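-- pv_equiv track=rewrite | github.com/Str-Ben/StructureBench | eval/planetarium_eval.py | _wrap_pddl_problem
-- ===== SOURCE A (Python) =====
-- def _find_block(blocks, prefix: str) -> str:
--     for block in blocks:
--         if block.lstrip().lower().startswith(prefix):
--             return block.strip()
--     return ""
--
-- def _wrap_pddl_problem(blocks, domain_name: str) -> str:
--     domain_block = _find_block(blocks, "(:domain")
--     if not domain_block and domain_name:
--         domain_block = f"(:domain {domain_name})"
--
--     requirements_block = _find_block(blocks, "(:requirements")
--     if not requirements_block:
--         default_requirements = {
--             "blocksworld": ":strips",
--             "gripper": ":strips",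
--             "floor-tile": ":typing",
--         }
--         req = default_requirements.get((domain_name or "").strip().lower())
--         if req:
--             requirements_block = f"(:requirements {req})"
--
--     objects_block = _find_block(blocks, "(:objects")
--     init_block = _find_block(blocks, "(:init")
--     goal_block = _find_block(blocks, "(:goal")
--
--     parts = [domain_block, requirements_block, objects_block, init_block, goal_block]
--     body = "\n  ".join([p for p in parts if p])
--     if not body:
--         return ""
--     return f"(define (problem predicted_problem)\n  {body}\n)"
-- ===== SOURCE B (Python) =====
-- def _wrap_pddl_problem(blocks, domain_name: str) -> str:
--     # One pass over blocks: compute each block's stripped-lowercased key once and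
--     # fill five first-match slots, instead of five separate scans.
--     dom = req = obj = ini = goal = None
--     for block in blocks:
--         key = block.lstrip().lower()
--         if dom is None and key.startswith("(:domain"):
--             dom = block.strip()
--         if req is None and key.startswith("(:requirements"):
--             req = block.strip()
--         if obj is None and key.startswith("(:objects"):
--             obj = block.strip()
--         if ini is None and key.startswith("(:init"):
--             ini = block.strip()
--         if goal is None and key.startswith("(:goal"):
--             goal = block.strip()
--     if dom is None and domain_name:
--         dom = f"(:domain {domain_name})"
--     if req is None:
--         r = {"blocksworld": ":strips",
--              "gripper": ":strips",
--              "floor-tile": ":typing"}.get((domain_name or "").strip().lower())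
--         if r is not None:
--             req = f"(:requirements {r})"
--     parts = [p for p in (dom, req, obj, ini, goal) if p]
--     body = "\n  ".join(parts)
--     if not body:
--         return ""
--     return f"(define (problem predicted_problem)\n  {body}\n)"
-- ===== Notes on version B (the rewrite author's own statement) =====
-- stated objective: alternative
-- what changed: B replaces A's five independent scans of blocks (each re-computing lstrip().lower() per block) with a single pass that computes each block's key once and fills five first-match slots, then assembles the result from the slots.
import Mathlib
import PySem

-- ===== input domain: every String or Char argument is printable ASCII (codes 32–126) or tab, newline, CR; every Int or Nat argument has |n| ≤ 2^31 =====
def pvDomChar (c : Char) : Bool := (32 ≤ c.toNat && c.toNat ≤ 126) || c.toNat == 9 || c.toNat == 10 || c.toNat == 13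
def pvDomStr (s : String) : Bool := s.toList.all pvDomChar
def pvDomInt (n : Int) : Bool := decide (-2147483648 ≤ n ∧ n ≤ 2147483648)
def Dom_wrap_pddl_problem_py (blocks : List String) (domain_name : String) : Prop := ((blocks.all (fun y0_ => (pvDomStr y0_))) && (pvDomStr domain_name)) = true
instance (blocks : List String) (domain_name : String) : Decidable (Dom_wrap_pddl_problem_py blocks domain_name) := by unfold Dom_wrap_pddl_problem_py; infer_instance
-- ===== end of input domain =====

-- B makes one pass over blocks (computing each block's key once, filling five first-match
-- slots) instead of A's five separate scans; objective: alternative (same asymptotics).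

-- ===== PORT A =====
def pvFindBlock (blocks : List String) (pre : String) : String :=
  match blocks with
  | [] => ""
  | b :: bs =>
    if PySem.Str.startswith (PySem.Str.lower (PySem.Str.lstrip b)) pre then
      PySem.Str.strip b
    else
      pvFindBlock bs pre

def wrap_pddl_problem_py (blocks : List String) (domain_name : String) : String :=
  let domain_block := pvFindBlock blocks "(:domain"
  let domain_block :=
    if domain_block = "" ∧ domain_name ≠ "" then "(:domain " ++ domain_name ++ ")"
    else domain_block
  let requirements_block := pvFindBlock blocks "(:requirements"
  let requirements_block :=
    if requirements_block = "" then
      let default_requirements : PySem.Dict String String :=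
        PySem.Dict.ofList [("blocksworld", ":strips"), ("gripper", ":strips"), ("floor-tile", ":typing")]
      match default_requirements.get? (PySem.Str.lower (PySem.Str.strip domain_name)) with
      | some req => "(:requirements " ++ req ++ ")"
      | none => requirements_block
    else requirements_block
  let objects_block := pvFindBlock blocks "(:objects"
  let init_block := pvFindBlock blocks "(:init"
  let goal_block := pvFindBlock blocks "(:goal"
  let parts := [domain_block, requirements_block, objects_block, init_block, goal_block]
  let body := PySem.Str.join "\n  " (parts.filter (fun p => p ≠ ""))
  if body = "" then "" else "(define (problem predicted_problem)\n  " ++ body ++ "\n)"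

-- ===== PORT B =====
structure PvSlots where
  dom : Option String
  req : Option String
  obj : Option String
  ini : Option String
  goal : Option String
deriving Repr, DecidableEq

def pvStep (s : PvSlots) (block : String) : PvSlots :=
  let key := PySem.Str.lower (PySem.Str.lstrip block)
  { dom := if s.dom = none ∧ PySem.Str.startswith key "(:domain" then some (PySem.Str.strip block) else s.dom,
    req := if s.req = none ∧ PySem.Str.startswith key "(:requirements" then some (PySem.Str.strip block) else s.req,
    obj := if s.obj = none ∧ PySem.Str.startswith key "(:objects" then some (PySem.Str.strip block) else s.obj,
    ini := if s.ini = none ∧ PySem.Str.startswith key "(:init" then some (PySem.Str.strip block) else s.ini,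
    goal := if s.goal = none ∧ PySem.Str.startswith key "(:goal" then some (PySem.Str.strip block) else s.goal }

def wrap_pddl_problem_py_alt (blocks : List String) (domain_name : String) : String :=
  let st := blocks.foldl pvStep ⟨none, none, none, none, none⟩
  let dom :=
    if st.dom = none ∧ domain_name ≠ "" then some ("(:domain " ++ domain_name ++ ")")
    else st.dom
  let req :=
    if st.req = none then
      ((PySem.Dict.ofList [("blocksworld", ":strips"), ("gripper", ":strips"), ("floor-tile", ":typing")] :
          PySem.Dict String String).get?
        (PySem.Str.lower (PySem.Str.strip domain_name))).map
        (fun r => "(:requirements " ++ r ++ ")")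
    else st.req
  -- [p for p in (…) if p]: keeps only non-None, non-empty entries
  let parts := [dom, req, st.obj, st.ini, st.goal].filterMap
    (fun o => match o with
      | some p => if p ≠ "" then some p else none
      | none => none)
  let body := PySem.Str.join "\n  " parts
  if body = "" then "" else "(define (problem predicted_problem)\n  " ++ body ++ "\n)"

-- ===== PRECONDITION & SPEC =====
def Spec_wrap_pddl_problem_py (blocks : List String) (domain_name : String) (out : String) : Prop := out = wrap_pddl_problem_py_alt blocks domain_name
instance (blocks : List String) (domain_name : String) (out : String) : Decidable (Spec_wrap_pddl_problem_py blocks domain_name out) := by unfold Spec_wrap_pddl_problem_py; infer_instance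

-- ===== CLAIM (what is proved, stated in full; the proofs are below) =====
def Claim_equal_wrap_pddl_problem_py : Prop := ∀ (blocks : List String) (domain_name : String), Dom_wrap_pddl_problem_py blocks domain_name → Spec_wrap_pddl_problem_py blocks domain_name (wrap_pddl_problem_py blocks domain_name)

-- ===== LEMMAS AND PROOFS =====

-- first block whose lstripped-lowered form starts with `pre`, stripped (proof-side view)
def pvFindOpt (blocks : List String) (pre : String) : Option String :=
  match blocks with
  | [] => none
  | b :: bs =>
    if PySem.Str.startswith (PySem.Str.lower (PySem.Str.lstrip b)) pre then
      some (PySem.Str.strip b)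
    else
      pvFindOpt bs pre

def pvHit (b pre : String) : Option String :=
  if PySem.Str.startswith (PySem.Str.lower (PySem.Str.lstrip b)) pre then
    some (PySem.Str.strip b)
  else none

def pvOr (a b : Option String) : Option String :=
  match a with
  | some x => some x
  | none => b

theorem pvOr_none (a : Option String) : pvOr a none = a := by cases a <;> rfl

theorem pvOr_assoc (a b c : Option String) : pvOr (pvOr a b) c = pvOr a (pvOr b c) := by
  cases a <;> rfl

theorem pvFindOpt_cons (b : String) (bs : List String) (pre : String) :
    pvFindOpt (b :: bs) pre = pvOr (pvHit b pre) (pvFindOpt bs pre) := by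
  simp only [pvFindOpt, pvHit]
  split_ifs <;> rfl

theorem pvFindBlock_eq (blocks : List String) (pre : String) :
    pvFindBlock blocks pre = (pvFindOpt blocks pre).getD "" := by
  induction blocks with
  | nil => rfl
  | cons b bs ih =>
    simp only [pvFindBlock, pvFindOpt]
    split <;> simp [ih]

theorem pvStep_eq (d r o i g : Option String) (b : String) :
    pvStep ⟨d, r, o, i, g⟩ b =
      ⟨pvOr d (pvHit b "(:domain"), pvOr r (pvHit b "(:requirements"),
       pvOr o (pvHit b "(:objects"), pvOr i (pvHit b "(:init"),
       pvOr g (pvHit b "(:goal")⟩ := by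
  simp only [pvStep, pvHit, PvSlots.mk.injEq]
  refine ⟨?_, ?_, ?_, ?_, ?_⟩ <;> [cases d; cases r; cases o; cases i; cases g] <;>
    simp [pvOr]

theorem pvFold_eq (blocks : List String) (s : PvSlots) :
    blocks.foldl pvStep s =
      ⟨pvOr s.dom (pvFindOpt blocks "(:domain"),
       pvOr s.req (pvFindOpt blocks "(:requirements"),
       pvOr s.obj (pvFindOpt blocks "(:objects"),
       pvOr s.ini (pvFindOpt blocks "(:init"),
       pvOr s.goal (pvFindOpt blocks "(:goal")⟩ := by
  induction blocks generalizing s with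
  | nil =>
    obtain ⟨d, r, o, i, g⟩ := s
    simp [pvFindOpt, pvOr_none]
  | cons b bs ih =>
    obtain ⟨d, r, o, i, g⟩ := s
    rw [List.foldl_cons, pvStep_eq, ih]
    simp only [pvFindOpt_cons, pvOr_assoc]

-- a found block is nonempty (its key starts with the nonempty prefix)
theorem pvStrip_ne_empty (b pre : String) (hpre : pre.toList ≠ [])
    (h : PySem.Str.startswith (PySem.Str.lower (PySem.Str.lstrip b)) pre = true) :
    PySem.Str.strip b ≠ "" := by
  simp only [PySem.Str.startswith_eq, PySem.Str.toList_lower, PySem.Str.toList_lstrip,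
    PySem.Chars.startswith_iff] at h
  have hL : PySem.Chars.lstrip b.toList ≠ [] := by
    intro e
    rw [e] at h
    simp only [PySem.Chars.lower, List.map_nil, List.prefix_nil] at h
    exact hpre h
  intro hs
  have hs' : (PySem.Str.strip b).toList = [] := by rw [hs]; rfl
  rw [PySem.Str.toList_strip] at hs'
  unfold PySem.Chars.strip PySem.Chars.rstrip PySem.Chars.lstrip at hs'
  unfold PySem.Chars.lstrip at hL
  rw [List.reverse_eq_nil_iff, List.dropWhile_eq_nil_iff] at hs'
  obtain ⟨y, ys, hy⟩ := List.exists_cons_of_ne_nil hL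
  have hny : PySem.Chars.isspace y = false := by
    have := List.head_dropWhile_not (l := b.toList) PySem.Chars.isspace (by simp [hy])
    simpa [hy] using this
  have hyy : PySem.Chars.isspace y = true := hs' y (by rw [hy]; simp)
  rw [hny] at hyy
  exact Bool.false_ne_true hyy

theorem pvFindOpt_ne_empty (blocks : List String) (pre v : String) (hpre : pre.toList ≠ [])
    (h : pvFindOpt blocks pre = some v) : v ≠ "" := by
  induction blocks with
  | nil => simp [pvFindOpt] at h
  | cons b bs ih =>
    simp only [pvFindOpt] at h
    split at h
    · injection h with h; subst h
      exact pvStrip_ne_empty b pre hpre (by assumption)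
    · exact ih h

theorem pv_lit_ne (a dn : String) (ha : a.length ≠ 0) : a ++ dn ++ ")" ≠ "" := by
  intro e
  have := congrArg String.length e
  simp [String.length_append] at this

set_option maxHeartbeats 1000000 in
theorem pv_main (blocks : List String) (domain_name : String) :
    wrap_pddl_problem_py blocks domain_name = wrap_pddl_problem_py_alt blocks domain_name := by
  unfold wrap_pddl_problem_py wrap_pddl_problem_py_alt
  rw [pvFold_eq]
  simp only [pvFindBlock_eq]
  generalize (PySem.Dict.ofList [("blocksworld", ":strips"), ("gripper", ":strips"),
      ("floor-tile", ":typing")] : PySem.Dict String String).get?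
      (PySem.Str.lower (PySem.Str.strip domain_name)) = q
  have h1 : ("(:domain " ++ domain_name ++ ")" : String) ≠ "" := pv_lit_ne _ _ (by decide)
  rcases hd : pvFindOpt blocks "(:domain" with _ | vd <;>
  rcases hr : pvFindOpt blocks "(:requirements" with _ | vr <;>
  rcases ho : pvFindOpt blocks "(:objects" with _ | vo <;>
  rcases hi : pvFindOpt blocks "(:init" with _ | vi <;>
  rcases hg : pvFindOpt blocks "(:goal" with _ | vg <;>
  rcases q with _ | rq
  all_goals try have h2 : ("(:requirements " ++ rq ++ ")" : String) ≠ "" := pv_lit_ne _ _ (by decide)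
  all_goals try have hvd := pvFindOpt_ne_empty blocks _ _ (by decide) hd
  all_goals try have hvr := pvFindOpt_ne_empty blocks _ _ (by decide) hr
  all_goals try have hvo := pvFindOpt_ne_empty blocks _ _ (by decide) ho
  all_goals try have hvi := pvFindOpt_ne_empty blocks _ _ (by decide) hi
  all_goals try have hvg := pvFindOpt_ne_empty blocks _ _ (by decide) hg
  all_goals simp only [pvOr]
  all_goals by_cases hdn : domain_name = "" <;> simp [hdn, h1, *]

-- ===== VERDICT (by name: the statement is the Claim_ definition above) =====
theorem wrap_pddl_problem_py_spec : Claim_equal_wrap_pddl_problem_py := by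
  intro blocks domain_name _
  exact pv_main blocks domain_name
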